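-- pv_equiv track=rewrite | github.com/ihish52/Mini-AES-Encryption-System | decryption.py | nibbleMult
-- ===== SOURCE A (Python) =====
-- irdc_poly = [0,0,1,0,0,1,1] #x^4+x+1
--
-- def rotateList(a, x):
-- ##returns an input list a shifted x number of times to the left
--     return a[x:] + a[:x]
--
-- def nibbleXOR(a, b):
-- ###where a and b are a list of 1 nibble each
-- ##returns nibble list with XOR operation performed c0, c1, c2, c3
-- ##simple XOR function implemented on list of int bits
-- ##also works for lists bigger than a nibble - used in nibbleMult function
--     c = []
--     for bit_i in range(len(a)):
--         x = a[bit_i] ^ b[bit_i]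
--         c.append(x)
--     return c
--
-- def nibbleMult(a, b):
-- ###where a and b are a list of 1 nibble each
-- ##returns nibble list with Galois field Multiplication performed for output c0, c1, c2, c3, c4
--     c = [0,0,0,0,0,0,0]
--
--     #multiplication part
--     for i in range(len(a)):
--         for j in range(len(b)):
--             c[i+j] ^=  a[i]*b[j]
--     #print (c)
--
--     #division part
--     #print (c) -- COME BACK TO THIS WHILE STATEMENT IF SOMETHING GOES WRONG IN ENCRYPTION
--     while(1 in c and c.index(1) < 3):#loop until power < x^4
--         shiftNum = 2 - c.index(1) #find number of times to shift divisor left based on power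
--         x = rotateList(irdc_poly, shiftNum) #shift irdc_poly by shiftNum to left
--         c = nibbleXOR(c, x)#XOR function
--
--     return (c[3:])##returns last 4 bits of c - first 3 powers don't exist after mult
-- ===== SOURCE B (Python) =====
-- def _conv(a, b, k):
--     ##coefficient k of the carry-less (XOR) product, computed directly
--     v = 0
--     for i in range(max(0, k - len(b) + 1), min(k, len(a) - 1) + 1):
--         v ^= a[i] * b[k - i]
--     return v
--
-- def _reduce(out, high):
--     ##fold the three high coefficients into the low four: x^4=x+1, x^5=x^2+x, x^6=x^3+x^2
--     for idx in range(3):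
--         if high[idx] == 1:
--             out[idx] ^= 1
--             out[idx + 1] ^= 1
--     return out
--
-- def nibbleMult(a, b):
--     return _reduce([_conv(a, b, k) for k in range(3, 7)],
--                    [_conv(a, b, k) for k in range(3)])
-- ===== Notes on version B (the rewrite author's own statement) =====
-- stated objective: simpler
-- what changed: B computes each product coefficient directly with a per-index convolution and folds the three high coefficients into the low four in one straight-line conditional pass (x^4=x+1, x^5=x^2+x, x^6=x^3+x^2), eliminating A's mutated length-7 list, c.index(1) search, list rotation and iterative long division.
import Mathlib
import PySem

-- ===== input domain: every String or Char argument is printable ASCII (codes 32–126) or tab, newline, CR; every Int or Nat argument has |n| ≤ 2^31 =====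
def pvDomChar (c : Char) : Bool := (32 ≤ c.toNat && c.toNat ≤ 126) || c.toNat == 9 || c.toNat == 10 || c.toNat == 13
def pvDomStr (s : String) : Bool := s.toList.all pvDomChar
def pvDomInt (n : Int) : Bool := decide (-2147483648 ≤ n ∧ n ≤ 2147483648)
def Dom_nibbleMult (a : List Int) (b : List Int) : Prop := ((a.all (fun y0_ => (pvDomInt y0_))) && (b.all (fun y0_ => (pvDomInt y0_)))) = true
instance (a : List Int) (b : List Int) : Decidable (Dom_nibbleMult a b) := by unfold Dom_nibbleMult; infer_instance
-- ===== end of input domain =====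

-- B computes each product coefficient directly by a per-index convolution and folds the
-- three high coefficients into the low four in one straight-line pass, replacing A's
-- c.index(1) search, list rotation and iterative long division (objective: simpler).

-- ===== PORT A =====
def pvIrdcPoly : List Int := [0, 0, 1, 0, 0, 1, 1]  -- x^4+x+1

-- rotateList(a, x) = a[x:] + a[:x]
def pvRotateList (a : List Int) (x : Int) : List Int :=
  PySem.List.slice a (some x) none ++ PySem.List.slice a none (some x)

-- nibbleXOR(a, b): element-wise XOR over range(len(a)); in A both arguments always
-- have length 7, so b[bit_i] is in range and the getD default is never read.
def pvNibbleXOR (a : List Int) (b : List Int) : List Int :=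
  (List.range a.length).foldl
    (fun c i => c ++ [PySem.Int.bxor (a.getD i 0) (b.getD i 0)]) []

-- the multiplication double loop: c[i+j] ^= a[i]*b[j]
-- (Python raises IndexError when some i+j > 6, i.e. both lists nonempty and
--  len(a)+len(b) > 8; Pre_ excludes exactly those inputs, so List.set's
--  out-of-range no-op is never reached inside Pre_)
def pvMultLoop (a : List Int) (b : List Int) : List Int :=
  (List.range a.length).foldl
    (fun c i =>
      (List.range b.length).foldl
        (fun c j => c.set (i + j) (PySem.Int.bxor (c.getD (i + j) 0) (a.getD i 0 * b.getD j 0)))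
        c)
    [0, 0, 0, 0, 0, 0, 0]

-- the while loop: while 1 in c and c.index(1) < 3: c = nibbleXOR(c, rotateList(poly, 2-idx)).
-- Fuel 4: each pass zeroes the first occurrence of 1 and leaves everything to its left
-- unchanged (the rotated polynomial is 0 there), so the first index of 1 among 0..2
-- strictly increases — the Python loop runs at most 3 times on every input.
def pvDivLoop : Nat → List Int → List Int
  | 0, c => c
  | n + 1, c =>
    match PySem.List.index? c 1 with
    | some idx =>
        if idx < 3 then
          pvDivLoop n (pvNibbleXOR c (pvRotateList pvIrdcPoly (2 - (idx : Int))))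
        else c
    | none => c

def nibbleMult (a : List Int) (b : List Int) : List Int :=
  PySem.List.slice (pvDivLoop 4 (pvMultLoop a b)) (some 3) none

-- ===== PORT B =====
-- _conv(a, b, k): v = 0; for i in range(max(0, k-len(b)+1), min(k, len(a)-1)+1): v ^= a[i]*b[k-i]
-- (both indices lie in range by construction, so the pyGetD default is never read)
def pvConv (a : List Int) (b : List Int) (k : Int) : Int :=
  (PySem.List.pyRange (max 0 (k - (b.length : Int) + 1)) (min k ((a.length : Int) - 1) + 1) 1).foldl
    (fun v i => PySem.Int.bxor v (PySem.List.pyGetD a i 0 * PySem.List.pyGetD b (k - i) 0)) 0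

-- _reduce(out, high): for idx in range(3): if high[idx] == 1: out[idx] ^= 1; out[idx+1] ^= 1
def pvReduce (out : List Int) (high : List Int) : List Int :=
  (List.range 3).foldl
    (fun out idx =>
      if high.getD idx 0 = 1 then
        let out1 := out.set idx (PySem.Int.bxor (out.getD idx 0) 1)
        out1.set (idx + 1) (PySem.Int.bxor (out1.getD (idx + 1) 0) 1)
      else out) out

def nibbleMult_alt (a : List Int) (b : List Int) : List Int :=
  pvReduce ((PySem.List.pyRange 3 7 1).map (fun k => pvConv a b k))
           ((PySem.List.pyRange 0 3 1).map (fun k => pvConv a b k))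

-- ===== PRECONDITION & SPEC =====
-- Pre_ is exactly the set of inputs on which the Python A returns normally: A raises
-- IndexError (c[i+j] with i+j > 6) precisely when both lists are nonempty and the
-- combined length exceeds 8.
def Pre_nibbleMult (a : List Int) (b : List Int) : Prop :=
  a = [] ∨ b = [] ∨ a.length + b.length ≤ 8
instance (a : List Int) (b : List Int) : Decidable (Pre_nibbleMult a b) := by
  unfold Pre_nibbleMult; infer_instance

def pvWitness_nibbleMult : List Int × List Int := ([1, 0, 1, 1], [0, 1, 1, 0])

def Spec_nibbleMult (a : List Int) (b : List Int) (out : List Int) : Prop := out = nibbleMult_alt a b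
instance (a : List Int) (b : List Int) (out : List Int) : Decidable (Spec_nibbleMult a b out) := by unfold Spec_nibbleMult; infer_instance

-- ===== CLAIM (what is proved, stated in full; the proofs are below) =====
def Claim_equal_nibbleMult : Prop := ∀ (a : List Int) (b : List Int), Dom_nibbleMult a b → Pre_nibbleMult a b → Spec_nibbleMult a b (nibbleMult a b)

-- ===== LEMMAS AND PROOFS =====

-- One pass of A's division loop at each first-1 index: the rotated polynomial is zero
-- to the left of that index, flips it to 0, and XORs 1 into two fixed positions ≥ 3.
lemma pv_step0 (n : Nat) (c1 c2 c3 c4 c5 c6 : Int) :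
    pvDivLoop (n+1) [1,c1,c2,c3,c4,c5,c6] =
      pvDivLoop n [0, c1, c2, PySem.Int.bxor c3 1, PySem.Int.bxor c4 1, c5, c6] := by
  rw [pvDivLoop]
  rw [PySem.List.index?_cons_self]
  show pvDivLoop n [PySem.Int.bxor 1 1, PySem.Int.bxor c1 0, PySem.Int.bxor c2 0,
    PySem.Int.bxor c3 1, PySem.Int.bxor c4 1, PySem.Int.bxor c5 0, PySem.Int.bxor c6 0] = _
  simp [PySem.Int.bxor_zero]

lemma pv_step1 (n : Nat) (c0 c2 c3 c4 c5 c6 : Int) (h0 : c0 ≠ 1) :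
    pvDivLoop (n+1) [c0,1,c2,c3,c4,c5,c6] =
      pvDivLoop n [c0, 0, c2, c3, PySem.Int.bxor c4 1, PySem.Int.bxor c5 1, c6] := by
  rw [pvDivLoop]
  rw [PySem.List.index?_cons_of_ne _ h0, PySem.List.index?_cons_self]
  show pvDivLoop n [PySem.Int.bxor c0 0, PySem.Int.bxor 1 1, PySem.Int.bxor c2 0,
    PySem.Int.bxor c3 0, PySem.Int.bxor c4 1, PySem.Int.bxor c5 1, PySem.Int.bxor c6 0] = _
  simp [PySem.Int.bxor_zero]

lemma pv_step2 (n : Nat) (c0 c1 c3 c4 c5 c6 : Int) (h0 : c0 ≠ 1) (h1 : c1 ≠ 1) :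
    pvDivLoop (n+1) [c0,c1,1,c3,c4,c5,c6] =
      pvDivLoop n [c0, c1, 0, c3, c4, PySem.Int.bxor c5 1, PySem.Int.bxor c6 1] := by
  rw [pvDivLoop]
  rw [PySem.List.index?_cons_of_ne _ h0, PySem.List.index?_cons_of_ne _ h1,
    PySem.List.index?_cons_self]
  show pvDivLoop n [PySem.Int.bxor c0 0, PySem.Int.bxor c1 0, PySem.Int.bxor 1 1,
    PySem.Int.bxor c3 0, PySem.Int.bxor c4 0, PySem.Int.bxor c5 1, PySem.Int.bxor c6 1] = _
  simp [PySem.Int.bxor_zero]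

lemma pv_stop (n : Nat) (c0 c1 c2 c3 c4 c5 c6 : Int) (h0 : c0 ≠ 1) (h1 : c1 ≠ 1) (h2 : c2 ≠ 1) :
    pvDivLoop (n+1) [c0,c1,c2,c3,c4,c5,c6] = [c0,c1,c2,c3,c4,c5,c6] := by
  rw [pvDivLoop]
  rw [PySem.List.index?_cons_of_ne _ h0, PySem.List.index?_cons_of_ne _ h1,
    PySem.List.index?_cons_of_ne _ h2]
  cases h : PySem.List.index? [c3,c4,c5,c6] 1 with
  | none => simp
  | some j => simp

-- A's whole division phase equals B's straight-line reduction, on an arbitrary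
-- length-7 coefficient list.
lemma pv_div_char (c0 c1 c2 c3 c4 c5 c6 : Int) :
    PySem.List.slice (pvDivLoop 4 [c0,c1,c2,c3,c4,c5,c6]) (some 3) none
      = pvReduce [c3,c4,c5,c6] [c0,c1,c2] := by
  by_cases h0 : c0 = 1 <;> by_cases h1 : c1 = 1 <;> by_cases h2 : c2 = 1
  · subst h0; subst h1; subst h2
    rw [pv_step0, pv_step1 _ _ _ _ _ _ _ (by decide), pv_step2 _ _ _ _ _ _ _ (by decide) (by decide),
      pv_stop _ _ _ _ _ _ _ _ (by decide) (by decide) (by decide)]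
    rfl
  · subst h0; subst h1
    rw [pv_step0, pv_step1 _ _ _ _ _ _ _ (by decide),
      pv_stop _ _ _ _ _ _ _ _ (by decide) (by decide) h2]
    simp [pvReduce, List.range_succ, h2]
    rfl
  · subst h0; subst h2
    rw [pv_step0, pv_step2 _ _ _ _ _ _ _ (by decide) h1,
      pv_stop _ _ _ _ _ _ _ _ (by decide) h1 (by decide)]
    simp [pvReduce, List.range_succ, h1]
    rfl
  · subst h0
    rw [pv_step0, pv_stop _ _ _ _ _ _ _ _ (by decide) h1 h2]
    simp [pvReduce, List.range_succ, h1, h2]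
    rfl
  · subst h1; subst h2
    rw [pv_step1 _ _ _ _ _ _ _ h0, pv_step2 _ _ _ _ _ _ _ h0 (by decide),
      pv_stop _ _ _ _ _ _ _ _ h0 (by decide) (by decide)]
    simp [pvReduce, List.range_succ, h0]
    rfl
  · subst h1
    rw [pv_step1 _ _ _ _ _ _ _ h0, pv_stop _ _ _ _ _ _ _ _ h0 (by decide) h2]
    simp [pvReduce, List.range_succ, h0, h2]
    rfl
  · subst h2
    rw [pv_step2 _ _ _ _ _ _ _ h0 h1, pv_stop _ _ _ _ _ _ _ _ h0 h1 (by decide)]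
    simp [pvReduce, List.range_succ, h0, h1]
    rfl
  · rw [pv_stop _ _ _ _ _ _ _ _ h0 h1 h2]
    simp [pvReduce, List.range_succ, h0, h1, h2]
    rfl

lemma pv_foldl_id {α β : Type} (l : List β) (c : α) :
    l.foldl (fun c _ => c) c = c := by
  induction l <;> simp_all

lemma pv_conv_nil_left (b : List Int) (k : Int) : pvConv [] b k = 0 := by
  unfold pvConv
  rw [PySem.List.pyRange_one_eq_nil (by simp)]
  rfl

lemma pv_conv_nil_right (a : List Int) (k : Int) : pvConv a [] k = 0 := by
  unfold pvConv
  rw [PySem.List.pyRange_one_eq_nil (by simp)]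
  rfl

lemma pv_eq_nil_left (b : List Int) : nibbleMult [] b = nibbleMult_alt [] b := by
  unfold nibbleMult_alt
  simp [PySem.List.pyRange_one_cons, PySem.List.pyRange_one_eq_nil, pv_conv_nil_left]
  rfl

lemma pv_eq_nil_right (a : List Int) : nibbleMult a [] = nibbleMult_alt a [] := by
  have hA : nibbleMult a [] = [0, 0, 0, 0] := by
    show PySem.List.slice
        (pvDivLoop 4 ((List.range a.length).foldl (fun c _ => c) [0,0,0,0,0,0,0]))
        (some 3) none = _
    rw [pv_foldl_id]
    rfl
  rw [hA]
  unfold nibbleMult_alt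
  simp [PySem.List.pyRange_one_cons, PySem.List.pyRange_one_eq_nil, pv_conv_nil_right]
  rfl

-- ===== VERDICT (by name: the statement is the Claim_ definition above) =====
set_option maxHeartbeats 2000000 in
theorem nibbleMult_spec : Claim_equal_nibbleMult := by
  intro a b _ hpre
  show nibbleMult a b = nibbleMult_alt a b
  rcases hpre with h | h | h
  · subst h; exact pv_eq_nil_left b
  · subst h; exact pv_eq_nil_right a
  · rcases a with _ | ⟨a0, a⟩
    · exact pv_eq_nil_left b
    rcases b with _ | ⟨b0, b⟩
    · exact pv_eq_nil_right _
    rcases a with _ | ⟨a1, a⟩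
    · -- a has exactly 1 element(s)
      rcases b with _ | ⟨b1, b⟩
      · unfold nibbleMult nibbleMult_alt
        simp [pvMultLoop, pvConv, List.range_succ, PySem.List.pyRange_one_cons,
          PySem.List.pyRange_one_eq_nil, PySem.List.pyGetD_ofNat']
        exact pv_div_char _ _ _ _ _ _ _
      rcases b with _ | ⟨b2, b⟩
      · unfold nibbleMult nibbleMult_alt
        simp [pvMultLoop, pvConv, List.range_succ, PySem.List.pyRange_one_cons,
          PySem.List.pyRange_one_eq_nil, PySem.List.pyGetD_ofNat']
        exact pv_div_char _ _ _ _ _ _ _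
      rcases b with _ | ⟨b3, b⟩
      · unfold nibbleMult nibbleMult_alt
        simp [pvMultLoop, pvConv, List.range_succ, PySem.List.pyRange_one_cons,
          PySem.List.pyRange_one_eq_nil, PySem.List.pyGetD_ofNat']
        exact pv_div_char _ _ _ _ _ _ _
      rcases b with _ | ⟨b4, b⟩
      · unfold nibbleMult nibbleMult_alt
        simp [pvMultLoop, pvConv, List.range_succ, PySem.List.pyRange_one_cons,
          PySem.List.pyRange_one_eq_nil, PySem.List.pyGetD_ofNat']
        exact pv_div_char _ _ _ _ _ _ _
      rcases b with _ | ⟨b5, b⟩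
      · unfold nibbleMult nibbleMult_alt
        simp [pvMultLoop, pvConv, List.range_succ, PySem.List.pyRange_one_cons,
          PySem.List.pyRange_one_eq_nil, PySem.List.pyGetD_ofNat']
        exact pv_div_char _ _ _ _ _ _ _
      rcases b with _ | ⟨b6, b⟩
      · unfold nibbleMult nibbleMult_alt
        simp [pvMultLoop, pvConv, List.range_succ, PySem.List.pyRange_one_cons,
          PySem.List.pyRange_one_eq_nil, PySem.List.pyGetD_ofNat']
        exact pv_div_char _ _ _ _ _ _ _
      rcases b with _ | ⟨b7, b⟩
      · unfold nibbleMult nibbleMult_alt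
        simp [pvMultLoop, pvConv, List.range_succ, PySem.List.pyRange_one_cons,
          PySem.List.pyRange_one_eq_nil, PySem.List.pyGetD_ofNat']
        exact pv_div_char _ _ _ _ _ _ _
      exfalso
      simp [List.length_cons] at h
      omega
    rcases a with _ | ⟨a2, a⟩
    · -- a has exactly 2 element(s)
      rcases b with _ | ⟨b1, b⟩
      · unfold nibbleMult nibbleMult_alt
        simp [pvMultLoop, pvConv, List.range_succ, PySem.List.pyRange_one_cons,
          PySem.List.pyRange_one_eq_nil, PySem.List.pyGetD_ofNat']
        exact pv_div_char _ _ _ _ _ _ _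
      rcases b with _ | ⟨b2, b⟩
      · unfold nibbleMult nibbleMult_alt
        simp [pvMultLoop, pvConv, List.range_succ, PySem.List.pyRange_one_cons,
          PySem.List.pyRange_one_eq_nil, PySem.List.pyGetD_ofNat']
        exact pv_div_char _ _ _ _ _ _ _
      rcases b with _ | ⟨b3, b⟩
      · unfold nibbleMult nibbleMult_alt
        simp [pvMultLoop, pvConv, List.range_succ, PySem.List.pyRange_one_cons,
          PySem.List.pyRange_one_eq_nil, PySem.List.pyGetD_ofNat']
        exact pv_div_char _ _ _ _ _ _ _
      rcases b with _ | ⟨b4, b⟩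
      · unfold nibbleMult nibbleMult_alt
        simp [pvMultLoop, pvConv, List.range_succ, PySem.List.pyRange_one_cons,
          PySem.List.pyRange_one_eq_nil, PySem.List.pyGetD_ofNat']
        exact pv_div_char _ _ _ _ _ _ _
      rcases b with _ | ⟨b5, b⟩
      · unfold nibbleMult nibbleMult_alt
        simp [pvMultLoop, pvConv, List.range_succ, PySem.List.pyRange_one_cons,
          PySem.List.pyRange_one_eq_nil, PySem.List.pyGetD_ofNat']
        exact pv_div_char _ _ _ _ _ _ _
      rcases b with _ | ⟨b6, b⟩
      · unfold nibbleMult nibbleMult_alt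
        simp [pvMultLoop, pvConv, List.range_succ, PySem.List.pyRange_one_cons,
          PySem.List.pyRange_one_eq_nil, PySem.List.pyGetD_ofNat']
        exact pv_div_char _ _ _ _ _ _ _
      exfalso
      simp [List.length_cons] at h
      omega
    rcases a with _ | ⟨a3, a⟩
    · -- a has exactly 3 element(s)
      rcases b with _ | ⟨b1, b⟩
      · unfold nibbleMult nibbleMult_alt
        simp [pvMultLoop, pvConv, List.range_succ, PySem.List.pyRange_one_cons,
          PySem.List.pyRange_one_eq_nil, PySem.List.pyGetD_ofNat']
        exact pv_div_char _ _ _ _ _ _ _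
      rcases b with _ | ⟨b2, b⟩
      · unfold nibbleMult nibbleMult_alt
        simp [pvMultLoop, pvConv, List.range_succ, PySem.List.pyRange_one_cons,
          PySem.List.pyRange_one_eq_nil, PySem.List.pyGetD_ofNat']
        exact pv_div_char _ _ _ _ _ _ _
      rcases b with _ | ⟨b3, b⟩
      · unfold nibbleMult nibbleMult_alt
        simp [pvMultLoop, pvConv, List.range_succ, PySem.List.pyRange_one_cons,
          PySem.List.pyRange_one_eq_nil, PySem.List.pyGetD_ofNat']
        exact pv_div_char _ _ _ _ _ _ _
      rcases b with _ | ⟨b4, b⟩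
      · unfold nibbleMult nibbleMult_alt
        simp [pvMultLoop, pvConv, List.range_succ, PySem.List.pyRange_one_cons,
          PySem.List.pyRange_one_eq_nil, PySem.List.pyGetD_ofNat']
        exact pv_div_char _ _ _ _ _ _ _
      rcases b with _ | ⟨b5, b⟩
      · unfold nibbleMult nibbleMult_alt
        simp [pvMultLoop, pvConv, List.range_succ, PySem.List.pyRange_one_cons,
          PySem.List.pyRange_one_eq_nil, PySem.List.pyGetD_ofNat']
        exact pv_div_char _ _ _ _ _ _ _
      exfalso
      simp [List.length_cons] at h
      omega
    rcases a with _ | ⟨a4, a⟩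
    · -- a has exactly 4 element(s)
      rcases b with _ | ⟨b1, b⟩
      · unfold nibbleMult nibbleMult_alt
        simp [pvMultLoop, pvConv, List.range_succ, PySem.List.pyRange_one_cons,
          PySem.List.pyRange_one_eq_nil, PySem.List.pyGetD_ofNat']
        exact pv_div_char _ _ _ _ _ _ _
      rcases b with _ | ⟨b2, b⟩
      · unfold nibbleMult nibbleMult_alt
        simp [pvMultLoop, pvConv, List.range_succ, PySem.List.pyRange_one_cons,
          PySem.List.pyRange_one_eq_nil, PySem.List.pyGetD_ofNat']
        exact pv_div_char _ _ _ _ _ _ _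
      rcases b with _ | ⟨b3, b⟩
      · unfold nibbleMult nibbleMult_alt
        simp [pvMultLoop, pvConv, List.range_succ, PySem.List.pyRange_one_cons,
          PySem.List.pyRange_one_eq_nil, PySem.List.pyGetD_ofNat']
        exact pv_div_char _ _ _ _ _ _ _
      rcases b with _ | ⟨b4, b⟩
      · unfold nibbleMult nibbleMult_alt
        simp [pvMultLoop, pvConv, List.range_succ, PySem.List.pyRange_one_cons,
          PySem.List.pyRange_one_eq_nil, PySem.List.pyGetD_ofNat']
        exact pv_div_char _ _ _ _ _ _ _
      exfalso
      simp [List.length_cons] at h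
      omega
    rcases a with _ | ⟨a5, a⟩
    · -- a has exactly 5 element(s)
      rcases b with _ | ⟨b1, b⟩
      · unfold nibbleMult nibbleMult_alt
        simp [pvMultLoop, pvConv, List.range_succ, PySem.List.pyRange_one_cons,
          PySem.List.pyRange_one_eq_nil, PySem.List.pyGetD_ofNat']
        exact pv_div_char _ _ _ _ _ _ _
      rcases b with _ | ⟨b2, b⟩
      · unfold nibbleMult nibbleMult_alt
        simp [pvMultLoop, pvConv, List.range_succ, PySem.List.pyRange_one_cons,
          PySem.List.pyRange_one_eq_nil, PySem.List.pyGetD_ofNat']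
        exact pv_div_char _ _ _ _ _ _ _
      rcases b with _ | ⟨b3, b⟩
      · unfold nibbleMult nibbleMult_alt
        simp [pvMultLoop, pvConv, List.range_succ, PySem.List.pyRange_one_cons,
          PySem.List.pyRange_one_eq_nil, PySem.List.pyGetD_ofNat']
        exact pv_div_char _ _ _ _ _ _ _
      exfalso
      simp [List.length_cons] at h
      omega
    rcases a with _ | ⟨a6, a⟩
    · -- a has exactly 6 element(s)
      rcases b with _ | ⟨b1, b⟩
      · unfold nibbleMult nibbleMult_alt
        simp [pvMultLoop, pvConv, List.range_succ, PySem.List.pyRange_one_cons,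
          PySem.List.pyRange_one_eq_nil, PySem.List.pyGetD_ofNat']
        exact pv_div_char _ _ _ _ _ _ _
      rcases b with _ | ⟨b2, b⟩
      · unfold nibbleMult nibbleMult_alt
        simp [pvMultLoop, pvConv, List.range_succ, PySem.List.pyRange_one_cons,
          PySem.List.pyRange_one_eq_nil, PySem.List.pyGetD_ofNat']
        exact pv_div_char _ _ _ _ _ _ _
      exfalso
      simp [List.length_cons] at h
      omega
    rcases a with _ | ⟨a7, a⟩
    · -- a has exactly 7 element(s)
      rcases b with _ | ⟨b1, b⟩
      · unfold nibbleMult nibbleMult_alt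
        simp [pvMultLoop, pvConv, List.range_succ, PySem.List.pyRange_one_cons,
          PySem.List.pyRange_one_eq_nil, PySem.List.pyGetD_ofNat']
        exact pv_div_char _ _ _ _ _ _ _
      exfalso
      simp [List.length_cons] at h
      omega
    exfalso
    simp [List.length_cons] at h
    omega
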